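-- pv_equiv track=rewrite | github.com/vikdevelop/SaveDesktop | po_change.py | collect_message_block
-- ===== SOURCE A (Python) =====
-- def collect_message_block(lines, start_index, msg_type):
--     """
--     Shromáždí celý blok msgid nebo msgstr včetně víceřádkových řetězců.
--     Vrací tuple: (seznam řádků, spojený obsah, index dalšího řádku)
--     """
--     block_lines = []
--     content_parts = []
--     i = start_index
--
--     # První řádek (msgid "..." nebo msgstr "...")
--     first_line = lines[i].strip()
--     block_lines.append(lines[i])
--
--     # Extrahujeme obsah z prvního řádku
--     if '"' in first_line:
--         start_quote = first_line.find('"')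
--         end_quote = first_line.rfind('"')
--         if start_quote != end_quote:
--             first_content = first_line[start_quote + 1:end_quote]
--             content_parts.append(decode_po_string(first_content))
--
--     i += 1
--
--     # Pokračujeme čtením dalších řádků, dokud najdeme řádky začínající uvozovkami
--     while i < len(lines):
--         line = lines[i].strip()
--
--         # Pokud řádek začíná uvozovkou, je to pokračování
--         if line.startswith('"') and line.endswith('"'):
--             block_lines.append(lines[i])
--             # Extrahujeme obsah mezi uvozovkami
--             content = line[1:-1]  # Odstraníme uvozovky
--             content_parts.append(decode_po_string(content))
--             i += 1
--         else:
--             break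
--
--     # Spojíme všechny části obsahu
--     full_content = ''.join(content_parts)
--
--     return block_lines, full_content, i
--
-- def decode_po_string(content):
--     """
--     Dekóduje escape sekvence v PO řetězci.
--     """
--     content = content.replace('\\n', '\n')
--     content = content.replace('\\t', '\t')
--     content = content.replace('\\r', '\r')
--     content = content.replace('\\"', '"')
--     content = content.replace('\\\\', '\\')
--     return content
-- ===== SOURCE B (Python) =====
-- def decode_po_string(content):
--     content = content.replace('\\n', '\n')
--     content = content.replace('\\t', '\t')
--     content = content.replace('\\r', '\r')
--     content = content.replace('\\"', '"')
--     content = content.replace('\\\\', '\\')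
--     return content
--
--
-- def collect_message_block(lines, start_index, msg_type):
--     # Pass 1: collect the raw block lines and the index of the next line.
--     block_lines = [lines[start_index]]
--     i = start_index + 1
--     while i < len(lines):
--         s = lines[i].strip()
--         if s.startswith('"') and s.endswith('"'):
--             block_lines.append(lines[i])
--             i += 1
--         else:
--             break
--     # Pass 2: decode the content of each collected line.
--     content_parts = []
--     for j, raw in enumerate(block_lines):
--         s = raw.strip()
--         if j == 0:
--             if '"' in s:
--                 a = s.find('"')
--                 b = s.rfind('"')
--                 if a != b:
--                     content_parts.append(decode_po_string(s[a + 1:b]))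
--         else:
--             content_parts.append(decode_po_string(s[1:-1]))
--     return block_lines, ''.join(content_parts), i
-- ===== Notes on version B (the rewrite author's own statement) =====
-- stated objective: alternative
-- what changed: B splits A's single fused loop into two passes: first collect the raw block lines and the next index, then a separate decoding pass over the collected lines (index 0 via find/rfind, later lines via [1:-1]), instead of decoding while scanning.
import Mathlib
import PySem

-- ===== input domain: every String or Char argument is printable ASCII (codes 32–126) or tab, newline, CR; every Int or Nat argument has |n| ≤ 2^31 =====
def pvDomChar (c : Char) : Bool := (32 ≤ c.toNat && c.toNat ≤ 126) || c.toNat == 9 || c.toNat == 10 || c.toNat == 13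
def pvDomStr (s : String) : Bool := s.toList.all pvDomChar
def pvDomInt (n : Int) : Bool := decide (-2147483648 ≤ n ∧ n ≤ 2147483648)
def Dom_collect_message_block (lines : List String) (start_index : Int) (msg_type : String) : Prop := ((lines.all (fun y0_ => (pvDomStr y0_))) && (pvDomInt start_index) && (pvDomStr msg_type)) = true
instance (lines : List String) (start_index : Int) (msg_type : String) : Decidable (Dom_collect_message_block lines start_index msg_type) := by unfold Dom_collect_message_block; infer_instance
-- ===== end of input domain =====

-- B restructures A's single fused loop into two passes (collect the raw block lines,
-- then decode them in a separate pass); same cost, different decomposition (objective: alternative).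

-- decode_po_string (identical helper in both Python sources)
def pvDecodePo (content : String) : String :=
  let c1 := PySem.Str.replace content "\\n" "\n"
  let c2 := PySem.Str.replace c1 "\\t" "\t"
  let c3 := PySem.Str.replace c2 "\\r" "\r"
  let c4 := PySem.Str.replace c3 "\\\"" "\""
  PySem.Str.replace c4 "\\\\" "\\"

-- the continuation test: lines[i].strip() starts and ends with '"'
def pvContinues (lines : List String) (i : Int) : Bool :=
  let line := PySem.Str.strip (PySem.List.pyGetD lines i "")
  PySem.Str.startswith line "\"" && PySem.Str.endswith line "\""

-- ===== PORT A =====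
-- A's while-loop: appends the raw line, decodes line[1:-1], advances i.
def pvLoopA (lines : List String) (i : Int) (block parts : List String) :
    List String × List String × Int :=
  if h : i < (lines.length : Int) then
    if pvContinues lines i then
      pvLoopA lines (i + 1) (block ++ [PySem.List.pyGetD lines i ""])
        (parts ++ [pvDecodePo (PySem.Str.slice (PySem.Str.strip (PySem.List.pyGetD lines i "")) (some 1) (some (-1)))])
    else (block, parts, i)
  else (block, parts, i)
termination_by ((lines.length : Int) - i).toNat
decreasing_by omega

def collect_message_block (lines : List String) (start_index : Int) (msg_type : String) :
    List String × String × Int :=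
  let first_line := PySem.Str.strip (PySem.List.pyGetD lines start_index "")
  let block0 := [PySem.List.pyGetD lines start_index ""]
  let parts0 :=
    if PySem.Str.isIn "\"" first_line then
      let start_quote := PySem.Str.find first_line "\""
      let end_quote := PySem.Str.rfind first_line "\""
      if start_quote ≠ end_quote then
        [pvDecodePo (PySem.Str.slice first_line (some (start_quote + 1)) (some end_quote))]
      else []
    else []
  let r := pvLoopA lines (start_index + 1) block0 parts0
  (r.1, PySem.Str.join "" r.2.1, r.2.2)

-- ===== PORT B =====
-- Pass 1: collect raw continuation lines only (no decoding), return them with the next index.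
def pvScanB (lines : List String) (i : Int) (block : List String) : List String × Int :=
  if h : i < (lines.length : Int) then
    if pvContinues lines i then
      pvScanB lines (i + 1) (block ++ [PySem.List.pyGetD lines i ""])
    else (block, i)
  else (block, i)
termination_by ((lines.length : Int) - i).toNat
decreasing_by omega

-- Pass 2, j = 0 case: extract via find/rfind guarded by '"' membership and a ≠ b.
def pvFirstParts (raw : String) : List String :=
  let s := PySem.Str.strip raw
  if PySem.Str.isIn "\"" s then
    let a := PySem.Str.find s "\""
    let b := PySem.Str.rfind s "\""
    if a ≠ b then [pvDecodePo (PySem.Str.slice s (some (a + 1)) (some b))] else []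
  else []

-- Pass 2, j > 0 case: strip the surrounding quotes with [1:-1] and decode.
def pvContPart (raw : String) : String :=
  pvDecodePo (PySem.Str.slice (PySem.Str.strip raw) (some 1) (some (-1)))

def collect_message_block_alt (lines : List String) (start_index : Int) (msg_type : String) :
    List String × String × Int :=
  let r := pvScanB lines (start_index + 1) [PySem.List.pyGetD lines start_index ""]
  let parts :=
    match r.1 with
    | [] => []
    | first :: rest => pvFirstParts first ++ rest.map pvContPart
  (r.1, PySem.Str.join "" parts, r.2)

-- ===== PRECONDITION & SPEC =====
-- A raises IndexError iff lines[start_index] is out of range; Pre_ admits exactly the in-range indices.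
def Pre_collect_message_block (lines : List String) (start_index : Int) (msg_type : String) : Prop :=
  PySem.Raise.InRange lines.length start_index
instance (lines : List String) (start_index : Int) (msg_type : String) : Decidable (Pre_collect_message_block lines start_index msg_type) := by unfold Pre_collect_message_block; infer_instance

def pvWitness_collect_message_block : List String × Int × String :=
  (["msgid \"a\\n\"", "\"b\"", "x"], 0, "msgid")

def Spec_collect_message_block (lines : List String) (start_index : Int) (msg_type : String) (out : List String × String × Int) : Prop := out = collect_message_block_alt lines start_index msg_type
instance (lines : List String) (start_index : Int) (msg_type : String) (out : List String × String × Int) : Decidable (Spec_collect_message_block lines start_index msg_type out) := by unfold Spec_collect_message_block; infer_instance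

-- ===== CLAIM (what is proved, stated in full; the proofs are below) =====
def Claim_equal_collect_message_block : Prop := ∀ (lines : List String) (start_index : Int) (msg_type : String), Dom_collect_message_block lines start_index msg_type → Pre_collect_message_block lines start_index msg_type → Spec_collect_message_block lines start_index msg_type (collect_message_block lines start_index msg_type)

-- ===== LEMMAS AND PROOFS =====

-- proof-side characterisation of the shared scan: the lines appended and the final index
def pvTail (lines : List String) (i : Int) : List String :=
  if h : i < (lines.length : Int) then
    if pvContinues lines i then PySem.List.pyGetD lines i "" :: pvTail lines (i + 1) else []
  else []
termination_by ((lines.length : Int) - i).toNat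
decreasing_by omega

def pvEnd (lines : List String) (i : Int) : Int :=
  if h : i < (lines.length : Int) then
    if pvContinues lines i then pvEnd lines (i + 1) else i
  else i
termination_by ((lines.length : Int) - i).toNat
decreasing_by omega

theorem pvScanB_spec (lines : List String) :
    ∀ (n : Nat) (i : Int) (block : List String),
      ((lines.length : Int) - i).toNat = n →
      pvScanB lines i block = (block ++ pvTail lines i, pvEnd lines i) := by
  intro n
  induction n with
  | zero =>
    intro i block hn
    rw [pvScanB, pvTail, pvEnd]
    rw [dif_neg (by omega), dif_neg (by omega), dif_neg (by omega)]
    simp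
  | succ m ih =>
    intro i block hn
    rw [pvScanB, pvTail, pvEnd]
    by_cases h : i < (lines.length : Int)
    · rw [dif_pos h, dif_pos h, dif_pos h]
      by_cases hc : pvContinues lines i
      · simp only [hc, if_true]
        rw [ih (i + 1) _ (by omega)]
        simp
      · simp [hc]
    · rw [dif_neg h, dif_neg h, dif_neg h]; simp

theorem pvLoopA_spec (lines : List String) :
    ∀ (n : Nat) (i : Int) (block parts : List String),
      ((lines.length : Int) - i).toNat = n →
      pvLoopA lines i block parts =
        (block ++ pvTail lines i, parts ++ (pvTail lines i).map pvContPart, pvEnd lines i) := by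
  intro n
  induction n with
  | zero =>
    intro i block parts hn
    rw [pvLoopA, pvTail, pvEnd]
    rw [dif_neg (by omega), dif_neg (by omega), dif_neg (by omega)]
    simp
  | succ m ih =>
    intro i block parts hn
    rw [pvLoopA, pvTail, pvEnd]
    by_cases h : i < (lines.length : Int)
    · rw [dif_pos h, dif_pos h, dif_pos h]
      by_cases hc : pvContinues lines i
      · simp only [hc, if_true]
        rw [ih (i + 1) _ _ (by omega)]
        simp [pvContPart]
      · simp [hc]
    · rw [dif_neg h, dif_neg h, dif_neg h]; simp

-- ===== VERDICT (by name: the statement is the Claim_ definition above) =====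
theorem collect_message_block_spec : Claim_equal_collect_message_block := by
  intro lines start_index msg_type _ _
  unfold Spec_collect_message_block
  unfold collect_message_block collect_message_block_alt
  dsimp only
  rw [pvLoopA_spec lines _ (start_index + 1) _ _ rfl,
      pvScanB_spec lines _ (start_index + 1) _ rfl]
  simp [pvFirstParts]
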